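-- pv_equiv track=rewrite | github.com/piyush4793/codechef-piyush | may-2020/isolation_centers.py | solve
-- ===== SOURCE A (Python) =====
-- def solve(dieseases, num_people):
--     # tracks how many people have S-i th diesease
--     freq = {}
--     # how many person can be admitted if there is 1 center, 2 centers, .. and so on
--     center_to_people = [0] * (num_people + 1) # can be optimized to max freq of a diesease, improves avg case not worst case
--     center_to_people[0] = 0
--
--     for diesease in dieseases:
--         freq[diesease] = freq[diesease] + 1 if diesease in freq else 1
--         center_to_people[freq[diesease]] = center_to_people[freq[diesease]] + 1
--
--     for idx in range(len(center_to_people)):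
--         if idx>1:
--             center_to_people[idx] += center_to_people[idx-1]
--
--     return center_to_people
-- ===== SOURCE B (Python) =====
-- def solve(dieseases, num_people):
--     # Different decomposition: count frequencies first, histogram them by exact
--     # frequency, then a single forward pass with a running ">= k" counter and
--     # a running total builds the cumulative answer by appending.
--     freq = {}
--     for d in dieseases:
--         freq[d] = freq.get(d, 0) + 1
--     hist = [0] * (num_people + 1)
--     for c in freq.values():
--         hist[c] += 1
--     result = [0]
--     running = len(freq)
--     total = 0
--     for k in range(1, num_people + 1):
--         total += running
--         result.append(total)
--         running -= hist[k]
--     return result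
-- ===== Notes on version B (the rewrite author's own statement) =====
-- stated objective: alternative
-- what changed: A increments the answer cell freq[d] once per person while counting, then does an in-place prefix pass over the whole array; B first builds the full frequency dict, histograms diseases by exact frequency, and then builds the answer in one forward pass that appends a running total while a running '>= k' counter is decremented by the histogram.
import Mathlib
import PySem

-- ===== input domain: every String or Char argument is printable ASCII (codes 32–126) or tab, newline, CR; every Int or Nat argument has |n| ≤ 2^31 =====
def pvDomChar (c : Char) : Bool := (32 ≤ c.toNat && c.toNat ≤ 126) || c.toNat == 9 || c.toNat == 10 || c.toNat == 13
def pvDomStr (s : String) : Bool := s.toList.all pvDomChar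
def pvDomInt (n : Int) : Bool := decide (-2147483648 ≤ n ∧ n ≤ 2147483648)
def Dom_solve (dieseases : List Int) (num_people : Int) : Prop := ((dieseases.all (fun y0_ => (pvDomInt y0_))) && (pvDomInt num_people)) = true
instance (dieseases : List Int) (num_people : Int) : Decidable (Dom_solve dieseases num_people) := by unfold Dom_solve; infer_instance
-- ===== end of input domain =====

-- B reorganizes A: full frequency dict first, then an exact-frequency histogram,
-- then one forward pass appending a running total while a running ">= k" counter
-- is decremented by the histogram (alternative decomposition, same cost).


-- ===== PORT A =====
def solve (dieseases : List Int) (num_people : Int) : List Int :=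
  -- center_to_people = [0] * (num_people + 1); center_to_people[0] = 0
  let center0 : List Int := List.replicate (num_people + 1).toNat 0
  let center1 : List Int := PySem.List.pySetD center0 0 0
  -- for diesease in dieseases: ...
  let st := dieseases.foldl
    (fun (st : PySem.Dict Int Int × List Int) d =>
      let freq := st.1.insert d (if st.1.contains d then st.1.getD d 0 + 1 else 1)
      let c := freq.getD d 0
      (freq, PySem.List.pySetD st.2 c (PySem.List.pyGetD st.2 c 0 + 1)))
    ((PySem.Dict.empty : PySem.Dict Int Int), center1)
  -- for idx in range(len(center_to_people)): if idx>1: center_to_people[idx] += center_to_people[idx-1]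
  (PySem.List.pyRange 0 (PySem.List.len st.2) 1).foldl
    (fun a idx =>
      if idx > 1 then PySem.List.pySetD a idx (PySem.List.pyGetD a idx 0 + PySem.List.pyGetD a (idx - 1) 0)
      else a)
    st.2

-- ===== PORT B =====
def solve_alt (dieseases : List Int) (num_people : Int) : List Int :=
  -- freq = {}; for d in dieseases: freq[d] = freq.get(d, 0) + 1
  let freq := dieseases.foldl (fun f d => f.insert d (f.getD d 0 + 1)) (PySem.Dict.empty : PySem.Dict Int Int)
  -- hist = [0] * (num_people + 1); for c in freq.values(): hist[c] += 1
  let hist0 : List Int := List.replicate (num_people + 1).toNat 0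
  let hist := freq.values.foldl (fun h c => PySem.List.pySetD h c (PySem.List.pyGetD h c 0 + 1)) hist0
  -- result = [0]; running = len(freq); total = 0
  -- for k in range(1, num_people + 1): total += running; result.append(total); running -= hist[k]
  let st := (PySem.List.pyRange 1 (num_people + 1) 1).foldl
    (fun (st : List Int × Int × Int) k =>
      let total := st.2.2 + st.2.1
      (st.1 ++ [total], st.2.1 - PySem.List.pyGetD hist k 0, total))
    ([0], ((freq.size : Int), 0))
  st.1

-- ===== PRECONDITION & SPEC =====
-- Pre_ excludes exactly the inputs on which A raises IndexError: a negative
-- num_people (empty center_to_people, so center_to_people[0] = 0 raises) and a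
-- disease frequency exceeding num_people (index past the end of the array).
def Pre_solve (dieseases : List Int) (num_people : Int) : Prop :=
  0 ≤ num_people ∧ ∀ x ∈ dieseases, (dieseases.count x : Int) ≤ num_people
instance (dieseases : List Int) (num_people : Int) : Decidable (Pre_solve dieseases num_people) := by
  unfold Pre_solve; infer_instance

def pvWitness_solve : List Int × Int := ([1, 1, 2], 2)

def Spec_solve (dieseases : List Int) (num_people : Int) (out : List Int) : Prop := out = solve_alt dieseases num_people
instance (dieseases : List Int) (num_people : Int) (out : List Int) : Decidable (Spec_solve dieseases num_people out) := by unfold Spec_solve; infer_instance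

-- ===== CLAIM (what is proved, stated in full; the proofs are below) =====
def Claim_equal_solve : Prop := ∀ (dieseases : List Int) (num_people : Int), Dom_solve dieseases num_people → Pre_solve dieseases num_people → Spec_solve dieseases num_people (solve dieseases num_people)

-- ===== LEMMAS AND PROOFS =====

def pvF (ds : List Int) (k : Nat) : Int :=
  ((PySem.Set.ofList ds).countP (fun e => decide (k ≤ ds.count e)) : Int)

def pvE (ds : List Int) (k : Nat) : Int :=
  ((PySem.Set.ofList ds).countP (fun e => ds.count e == k) : Int)

def pvS (ds : List Int) (k : Nat) : Int :=
  ((List.range k).map (fun j => pvF ds (j + 1))).sum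

lemma pv_setRange {N : Nat} (g : Nat → Int) (m : Nat) (v : Int) :
    PySem.List.pySetD ((List.range N).map g) ((m : Nat) : Int) v
      = (List.range N).map (fun k => if k = m then v else g k) := by
  rw [PySem.List.pySetD_natCast]
  apply List.ext_getElem
  · simp
  · intro i h1 h2
    simp only [List.getElem_set, List.getElem_map, List.getElem_range]
    rcases eq_or_ne i m with rfl | hne
    · simp
    · simp [Ne.symm hne, hne]

lemma pv_getRange {N : Nat} (g : Nat → Int) (m : Nat) (hm : m < N) (d : Int) :
    PySem.List.pyGetD ((List.range N).map g) ((m : Nat) : Int) d = g m := by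
  rw [PySem.List.pyGetD_natCast]
  exact PySem.List.getD_map_range g N m d hm

-- point update of countP on a nodup list
lemma pv_countP_update (L : List Int) (hnd : L.Nodup) (d : Int) (hd : d ∈ L)
    (q q' : Int → Bool) (hagree : ∀ e, e ≠ d → q e = q' e) :
    L.countP q' + (if q d then 1 else 0) = L.countP q + (if q' d then 1 else 0) := by
  induction L with
  | nil => simp at hd
  | cons a t ih =>
    rcases List.nodup_cons.mp hnd with ⟨hat, hndt⟩
    rcases List.mem_cons.mp hd with rfl | hdt
    · have ht : t.countP q' = t.countP q := by
        apply List.countP_congr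
        intro e he
        rw [hagree e (by rintro rfl; exact hat he)]
      simp only [List.countP_cons, ht]
      omega
    · have ha : q a = q' a := hagree a (by rintro rfl; exact hat hdt)
      have := ih hndt hdt
      simp only [List.countP_cons, ← ha]
      omega

lemma pv_count_step (L : List Int) (hnd : L.Nodup) (d : Int) (hd : d ∈ L)
    (p : List Int) (k : Nat) :
    L.countP (fun e => decide (k ≤ (p ++ [d]).count e))
      = L.countP (fun e => decide (k ≤ p.count e)) + (if k = p.count d + 1 then 1 else 0) := by
  have h := pv_countP_update L hnd d hd
    (fun e => decide (k ≤ p.count e)) (fun e => decide (k ≤ (p ++ [d]).count e))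
    (by
      intro e he
      have : (p ++ [d]).count e = p.count e := by
        simp [List.count_append, List.count_singleton]
        rintro rfl; exact absurd rfl he
      simp [this])
  have hcd : (p ++ [d]).count d = p.count d + 1 := by
    simp [List.count_append]
  simp only [decide_eq_true_eq, hcd] at h
  by_cases hcase : k = p.count d + 1
  · rw [if_neg (by omega), if_pos (by omega)] at h
    rw [if_pos hcase]
    omega
  · have heq : (k ≤ p.count d + 1) ↔ (k ≤ p.count d) := by omega
    rw [if_neg hcase]
    by_cases h3 : k ≤ p.count d
    · rw [if_pos h3, if_pos (heq.mpr h3)] at h; omega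
    · rw [if_neg h3, if_neg (fun hh => h3 (heq.mp hh))] at h; omega

lemma pv_partition_nat (L : List Int) (c : Int → Nat) (k : Nat) :
    L.countP (fun e => decide (k ≤ c e))
      = L.countP (fun e => decide (k + 1 ≤ c e)) + L.countP (fun e => c e == k) := by
  induction L with
  | nil => simp
  | cons a t ih =>
    simp only [List.countP_cons, ih, decide_eq_true_eq, beq_iff_eq]
    by_cases h1 : c a = k
    · rw [if_pos h1, if_pos (by omega), if_neg (by omega)]; omega
    · rw [if_neg h1]
      by_cases h2 : k + 1 ≤ c a
      · rw [if_pos h2, if_pos (by omega)]; omega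
      · rw [if_neg h2]
        by_cases h3 : k ≤ c a
        · exact absurd (by omega : c a = k) h1
        · rw [if_neg h3]; omega

lemma pv_partition (ds : List Int) (k : Nat) :
    pvF ds k = pvF ds (k + 1) + pvE ds k := by
  unfold pvF pvE
  rw [← Nat.cast_add, pv_partition_nat (PySem.Set.ofList ds) (fun e => ds.count e) k]

lemma pvS_succ (ds : List Int) (k : Nat) :
    pvS ds (k + 1) = pvS ds k + pvF ds (k + 1) := by
  simp [pvS, List.range_succ]

-- histogram-increment fold (B's hist loop)
lemma pv_incrFold {N : Nat} :
    ∀ (ms : List Nat) (g : Nat → Int), (∀ m ∈ ms, m < N) →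
    (ms.map (fun m => ((m : Nat) : Int))).foldl
        (fun h c => PySem.List.pySetD h c (PySem.List.pyGetD h c 0 + 1)) ((List.range N).map g)
      = (List.range N).map (fun k => g k + (ms.count k : Int)) := by
  intro ms
  induction ms with
  | nil => intro g _; simp
  | cons m t ih =>
    intro g hb
    simp only [List.map_cons, List.foldl_cons]
    rw [pv_getRange g m (hb m (by simp)) 0, pv_setRange]
    rw [ih (fun k => if k = m then g m + 1 else g k) (fun x hx => hb x (by simp [hx]))]
    apply List.map_congr_left
    intro k _
    rcases eq_or_ne k m with rfl | hne
    · rw [if_pos rfl, List.count_cons_self]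
      push_cast; ring
    · rw [if_neg hne]
      simp [Ne.symm hne]

-- A's counting loop
lemma pv_loopA (ds : List Int) {N : Nat} (hcnt : ∀ e ∈ ds, ds.count e < N) :
    ∀ (q p : List Int) (freq : PySem.Dict Int Int), p ++ q = ds →
    (∀ e, freq.getD e 0 = (p.count e : Int)) →
    (∀ e, freq.contains e = true ↔ e ∈ p) →
    (q.foldl (fun (st : PySem.Dict Int Int × List Int) d =>
        let f2 := st.1.insert d (if st.1.contains d then st.1.getD d 0 + 1 else 1)
        let c := f2.getD d 0
        (f2, PySem.List.pySetD st.2 c (PySem.List.pyGetD st.2 c 0 + 1)))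
      (freq, (List.range N).map
        (fun k => if k = 0 then (0 : Int)
                  else ((PySem.Set.ofList ds).countP (fun e => decide (k ≤ p.count e)) : Int)))).2
    = (List.range N).map (fun k => if k = 0 then (0 : Int) else pvF ds k) := by
  intro q
  induction q with
  | nil =>
    intro p freq hpq _ _
    simp only [List.foldl_nil]
    rw [List.append_nil] at hpq
    subst hpq
    rfl
  | cons d q' ih =>
    intro p freq hpq hg hc
    have hdds : d ∈ ds := by rw [← hpq]; simp
    have hdL : d ∈ PySem.Set.ofList ds := (PySem.Set.mem_ofList ds d).mpr hdds
    have hcount_le : p.count d + 1 ≤ ds.count d := by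
      rw [← hpq, List.count_append, List.count_cons_self]
      omega
    have hmN : p.count d + 1 < N := lt_of_le_of_lt hcount_le (hcnt d hdds)
    simp only [List.foldl_cons]
    have hval : (if freq.contains d then freq.getD d 0 + 1 else 1) = ((p.count d : Int) + 1) := by
      by_cases hmem : d ∈ p
      · rw [if_pos ((hc d).mpr hmem), hg d]
      · have h0 : p.count d = 0 := List.count_eq_zero.mpr hmem
        rw [if_neg (fun h => hmem ((hc d).mp h)), h0]
        norm_num
    rw [hval]
    have hcv : ((freq.insert d ((p.count d : Int) + 1)).getD d 0) = (((p.count d + 1 : Nat)) : Int) := by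
      rw [PySem.Dict.getD_insert_self]
      push_cast; ring
    rw [hcv, pv_getRange _ _ hmN, pv_setRange]
    have harr : (List.range N).map
          (fun k => if k = p.count d + 1
            then (if p.count d + 1 = 0 then (0:Int) else ((PySem.Set.ofList ds).countP (fun e => decide (p.count d + 1 ≤ p.count e)) : Int)) + 1
            else if k = 0 then (0:Int) else ((PySem.Set.ofList ds).countP (fun e => decide (k ≤ p.count e)) : Int))
        = (List.range N).map
          (fun k => if k = 0 then (0:Int)
            else ((PySem.Set.ofList ds).countP (fun e => decide (k ≤ (p ++ [d]).count e)) : Int)) := by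
      apply List.map_congr_left
      intro k _
      rcases Nat.eq_zero_or_pos k with rfl | hk1
      · rw [if_neg (by omega), if_pos rfl, if_pos rfl]
      · rw [pv_count_step (PySem.Set.ofList ds) (PySem.Set.nodup_ofList ds) d hdL p k]
        rcases eq_or_ne k (p.count d + 1) with rfl | hne
        · rw [if_pos rfl, if_neg (by omega), if_neg (by omega), if_pos rfl]
          push_cast; ring
        · rw [if_neg hne, if_neg (Nat.pos_iff_ne_zero.mp hk1), if_neg (Nat.pos_iff_ne_zero.mp hk1), if_neg hne]
          push_cast; ring
    rw [harr]
    apply ih (p ++ [d])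
    · rw [← hpq]; simp
    · intro e
      rw [PySem.Dict.getD_insert]
      rcases eq_or_ne e d with rfl | hne
      · rw [if_pos rfl, List.count_append]
        simp
      · rw [if_neg hne, hg e, List.count_append]
        have : [d].count e = 0 := by simp [Ne.symm hne]
        rw [this]
        norm_num
    · intro e
      rw [PySem.Dict.contains_insert]
      simp only [Bool.or_eq_true, beq_iff_eq]
      rw [hc e]
      constructor
      · rintro (rfl | h)
        · simp
        · exact List.mem_append.mpr (Or.inl h)
      · intro h
        rcases List.mem_append.mp h with h | h
        · exact Or.inr h
        · simp at h; exact Or.inl h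

-- A's in-place prefix pass over range(len(arr))
lemma pv_prefixPass {N : Nat} (g : Nat → Int) (hg0 : g 0 = 0) :
    ∀ m, m ≤ N →
    ((List.range m).map (fun i => ((i : Nat) : Int))).foldl
        (fun a idx =>
          if idx > 1 then PySem.List.pySetD a idx (PySem.List.pyGetD a idx 0 + PySem.List.pyGetD a (idx - 1) 0)
          else a)
        ((List.range N).map g)
      = (List.range N).map
          (fun k => if k < m then ((List.range k).map (fun j => g (j + 1))).sum else g k) := by
  intro m
  induction m with
  | zero =>
    intro _
    simp
  | succ m ih =>
    intro hm
    rw [List.range_succ, List.map_append, List.foldl_append, ih (by omega)]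
    simp only [List.map_cons, List.map_nil, List.foldl_cons, List.foldl_nil]
    by_cases h2 : (m : Int) > 1
    · rw [if_pos h2]
      have hm2 : 2 ≤ m := by exact_mod_cast h2
      have hmm : (m : Int) - 1 = ((m - 1 : Nat) : Int) := by push_cast [Nat.cast_sub (by omega : 1 ≤ m)]; ring
      rw [hmm, pv_getRange _ m (by omega) 0, pv_getRange _ (m - 1) (by omega) 0, pv_setRange]
      apply List.map_congr_left
      intro k hk
      rw [if_neg (by omega : ¬ m < m), if_pos (by omega : m - 1 < m)]
      rcases eq_or_ne k m with rfl | hne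
      · rw [if_pos rfl, if_pos (by omega)]
        have : k = (k - 1) + 1 := by omega
        rw [this, List.range_succ, List.map_append]
        simp
        ring
      · rw [if_neg hne]
        rcases lt_or_ge k m with hlt | hge
        · rw [if_pos hlt, if_pos (by omega)]
        · rw [if_neg (by omega), if_neg (by omega)]
    · rw [if_neg h2]
      apply List.map_congr_left
      intro k hk
      have hm1 : m = 0 ∨ m = 1 := by
        have : (m : Int) ≤ 1 := by omega
        have : m ≤ 1 := by exact_mod_cast this
        omega
      rcases lt_or_ge k m with hlt | hge
      · rw [if_pos hlt, if_pos (by omega)]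
      · rcases eq_or_ne k m with rfl | hne
        · rw [if_neg (by omega), if_pos (by omega)]
          rcases hm1 with rfl | rfl
          · simpa using hg0
          · simp
        · rw [if_neg (by omega), if_neg (by omega)]

-- B's forward pass with running ">= k" counter
lemma pv_loopB (ds : List Int) (n : Nat) (hist : List Int)
    (hhist : ∀ k, k < n + 1 → PySem.List.pyGetD hist ((k : Nat) : Int) 0 = pvE ds k) :
    ∀ m, m ≤ n →
    ((List.range m).map (fun j => (1 : Int) + ((j : Nat) : Int))).foldl
        (fun (st : List Int × Int × Int) k =>
          let total := st.2.2 + st.2.1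
          (st.1 ++ [total], st.2.1 - PySem.List.pyGetD hist k 0, total))
        ([0], (pvF ds 1, 0))
      = ((List.range (m + 1)).map (pvS ds), (pvF ds (m + 1), pvS ds m)) := by
  intro m
  induction m with
  | zero =>
    intro _
    simp [pvS]
  | succ m ih =>
    intro hm
    rw [List.range_succ, List.map_append, List.foldl_append, ih (by omega)]
    simp only [List.map_cons, List.map_nil, List.foldl_cons, List.foldl_nil]
    have hidx : (1 : Int) + ((m : Nat) : Int) = (((m + 1 : Nat)) : Int) := by push_cast; ring
    rw [hidx, hhist (m + 1) (by omega)]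
    have htot : pvS ds m + pvF ds (m + 1) = pvS ds (m + 1) := (pvS_succ ds m).symm
    have hrun : pvF ds (m + 1) - pvE ds (m + 1) = pvF ds (m + 1 + 1) := by
      have := pv_partition ds (m + 1)
      omega
    rw [htot, hrun]
    congr 1
    rw [show List.range (m + 1 + 1) = List.range (m + 1) ++ [m + 1] from List.range_succ,
        List.map_append, List.range_succ, List.map_append]
    simp

lemma pv_zeros {N : Nat} :
    List.replicate N (0 : Int) = (List.range N).map (fun _ => (0 : Int)) := by
  simp [List.map_const']

lemma pv_A_eq (ds : List Int) (n : Nat) (hcnt : ∀ e ∈ ds, ds.count e < n + 1) :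
    solve ds (n : Int) = (List.range (n + 1)).map (pvS ds) := by
  simp only [solve]
  have hN : ((n : Int) + 1).toNat = n + 1 := by omega
  rw [hN]
  have hset : PySem.List.pySetD (List.replicate (n + 1) (0 : Int)) 0 0
      = List.replicate (n + 1) (0 : Int) := by
    rw [PySem.List.pySetD_of_nonneg (List.replicate (n + 1) (0 : Int)) (0 : Int) (by norm_num)]
    simp [List.replicate_succ]
  rw [hset, pv_zeros]
  have hinit : (List.range (n + 1)).map (fun _ => (0 : Int))
      = (List.range (n + 1)).map
          (fun k => if k = 0 then (0 : Int)
            else ((PySem.Set.ofList ds).countP (fun e => decide (k ≤ List.count e ([] : List Int))) : Int)) := by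
    apply List.map_congr_left
    intro k _
    rcases Nat.eq_zero_or_pos k with rfl | hk
    · simp
    · rw [if_neg (by omega)]
      have : (fun (e : Int) => decide (k ≤ List.count e ([] : List Int))) = fun _ => false := by
        funext e; simp [List.count_nil]; omega
      rw [this, List.countP_false]
      simp
  rw [hinit,
    pv_loopA ds hcnt ds [] PySem.Dict.empty rfl
      (by intro e; simp [PySem.Dict.getD_empty])
      (by intro e; simp [PySem.Dict.contains_empty])]
  have hlen : PySem.List.len ((List.range (n + 1)).map (fun k => if k = 0 then (0 : Int) else pvF ds k))
      = ((n + 1 : Nat) : Int) := by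
    simp [PySem.List.len_eq]
  rw [hlen, PySem.List.pyRange_zero_nat,
    pv_prefixPass (fun k => if k = 0 then (0 : Int) else pvF ds k) (by simp) (n + 1) le_rfl]
  apply List.map_congr_left
  intro k hk
  rw [if_pos (List.mem_range.mp hk)]
  unfold pvS
  apply congrArg
  apply List.map_congr_left
  intro j _
  rw [if_neg (by omega)]

lemma pv_B_eq (ds : List Int) (n : Nat) (hcnt : ∀ e ∈ ds, ds.count e < n + 1) :
    solve_alt ds (n : Int) = (List.range (n + 1)).map (pvS ds) := by
  simp only [solve_alt]
  have hN : ((n : Int) + 1).toNat = n + 1 := by omega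
  rw [hN, PySem.Dict.foldl_insert_getD_add_one_eq_counter]
  have hvals : (PySem.Dict.counter ds).values
      = ((PySem.Set.ofList ds).map (fun e => ds.count e)).map (fun m => ((m : Nat) : Int)) := by
    rw [PySem.Dict.values_eq_map_keys _ (PySem.Dict.nodup_keys_counter ds) 0,
      PySem.Dict.keys_counter, List.map_map]
    exact List.map_congr_left (fun e _ => PySem.Dict.getD_counter ds e)
  rw [hvals, pv_zeros,
    pv_incrFold ((PySem.Set.ofList ds).map (fun e => ds.count e)) (fun _ => (0 : Int))
      (by
        intro m hm
        rcases List.mem_map.mp hm with ⟨e, he, rfl⟩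
        exact hcnt e ((PySem.Set.mem_ofList ds e).mp he))]
  have hsize : ((PySem.Dict.counter ds).size : Int) = pvF ds 1 := by
    have h1 : (PySem.Dict.counter ds).size = (PySem.Set.ofList ds).length := by
      simp [PySem.Dict.size, PySem.Dict.items_counter]
    have h2 : (PySem.Set.ofList ds).countP (fun e => decide (1 ≤ ds.count e))
        = (PySem.Set.ofList ds).length := by
      apply List.countP_eq_length.mpr
      intro e he
      have : e ∈ ds := (PySem.Set.mem_ofList ds e).mp he
      simpa using List.count_pos_iff.mpr this
    unfold pvF
    rw [h1, ← h2]
  rw [hsize]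
  have hrange : PySem.List.pyRange 1 ((n : Int) + 1) 1
      = (List.range n).map (fun j => (1 : Int) + ((j : Nat) : Int)) := by
    rw [PySem.List.pyRange_one]
    have : ((n : Int) + 1 - 1).toNat = n := by omega
    rw [this]
  rw [hrange, pv_loopB ds n _
    (by
      intro k hk
      rw [pv_getRange _ k hk 0]
      unfold pvE
      rw [show ((PySem.Set.ofList ds).map (fun e => ds.count e)).count k
            = (PySem.Set.ofList ds).countP (fun e => ds.count e == k) from ?_]
      · ring
      · rw [List.count, List.countP_map]
        rfl)
    n le_rfl]

-- ===== VERDICT (by name: the statement is the Claim_ definition above) =====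
theorem solve_spec : Claim_equal_solve := by
  unfold Claim_equal_solve Spec_solve
  intro ds np _ hpre
  obtain ⟨h0, hcnt⟩ := hpre
  lift np to Nat using h0 with n
  have hc : ∀ e ∈ ds, ds.count e < n + 1 := by
    intro e he
    have := hcnt e he
    have : ds.count e ≤ n := by exact_mod_cast this
    omega
  rw [pv_A_eq ds n hc, pv_B_eq ds n hc]
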